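-- pv_equiv track=rewrite | github.com/Wooziii/WechatEngine | mcp_server.py | _resolve_sender_candidates
-- ===== SOURCE A (Python) =====
-- def _dedup_keep_order(items):
--     seen = set()
--     out = []
--     for x in items:
--         if x in seen:
--             continue
--         seen.add(x)
--         out.append(x)
--     return out
--
-- def _resolve_sender_candidates(sender_query, contact_names, known_usernames):
--     """Resolve sender input to candidate usernames in a group."""
--     q = str(sender_query or "").strip()
--     if not q:
--         return []
--     ql = q.lower()
--     known = [u for u in known_usernames if isinstance(u, str) and u]
--
--     # Exact username
--     exact_user = [u for u in known if u.lower() == ql]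
--     if exact_user:
--         return _dedup_keep_order(exact_user)
--
--     # Exact display name
--     exact_display = []
--     for u in known:
--         d = str(contact_names.get(u, u) or u).lower()
--         if d == ql:
--             exact_display.append(u)
--     if exact_display:
--         return _dedup_keep_order(exact_display)
--
--     # Partial match (username/display)
--     partial = []
--     for u in known:
--         d = str(contact_names.get(u, u) or u).lower()
--         if ql in u.lower() or ql in d:
--             partial.append(u)
--     return _dedup_keep_order(partial)
-- ===== SOURCE B (Python) =====
-- def _resolve_sender_candidates(sender_query, contact_names, known_usernames):
--     """Single categorizing pass into three priority buckets, then tier selection."""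
--     q = str(sender_query or "").strip()
--     if not q:
--         return []
--     ql = q.lower()
--     exact_user, exact_display, partial = [], [], []
--     for u in known_usernames:
--         if not (isinstance(u, str) and u):
--             continue
--         ul = u.lower()
--         d = str(contact_names.get(u, u) or u).lower()
--         if ul == ql:
--             exact_user.append(u)
--         if d == ql:
--             exact_display.append(u)
--         if ql in ul or ql in d:
--             partial.append(u)
--     bucket = exact_user or exact_display or partial
--     return list(dict.fromkeys(bucket))
-- ===== Notes on version B (the rewrite author's own statement) =====
-- stated objective: alternative
-- what changed: Replaced three cascaded early-returning scans (exact username, exact display, partial) with one categorizing pass that fills three priority buckets, then returns the ordered dedup (dict.fromkeys) of the first non-empty bucket.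
import Mathlib
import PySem

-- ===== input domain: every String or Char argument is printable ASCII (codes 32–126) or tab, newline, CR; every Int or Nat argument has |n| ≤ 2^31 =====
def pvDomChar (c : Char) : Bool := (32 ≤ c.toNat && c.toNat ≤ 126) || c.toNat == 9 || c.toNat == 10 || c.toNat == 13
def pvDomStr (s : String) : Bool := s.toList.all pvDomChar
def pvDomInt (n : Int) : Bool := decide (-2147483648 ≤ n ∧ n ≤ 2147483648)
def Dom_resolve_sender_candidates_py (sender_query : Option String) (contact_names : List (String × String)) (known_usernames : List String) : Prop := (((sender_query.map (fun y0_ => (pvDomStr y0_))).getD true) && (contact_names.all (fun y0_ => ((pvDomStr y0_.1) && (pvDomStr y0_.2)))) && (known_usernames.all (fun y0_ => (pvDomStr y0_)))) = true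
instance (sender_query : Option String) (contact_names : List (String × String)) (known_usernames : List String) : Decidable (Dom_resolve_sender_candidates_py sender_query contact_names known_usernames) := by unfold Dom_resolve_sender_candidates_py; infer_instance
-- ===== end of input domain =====

-- B replaces A's three cascaded early-returning scans by ONE categorizing pass into three
-- priority buckets plus a tier selection and a dict.fromkeys dedup (objective: alternative).

-- ===== PORT A =====
-- str(contact_names.get(u, u) or u).lower()
def pvDispLower (contact_names : List (String × String)) (u : String) : String :=
  let g := (PySem.Dict.mk contact_names).getD u u
  PySem.Str.lower (if g = "" then u else g)

-- A's _dedup_keep_order: seen-set + output list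
def pvDedupKeepOrder (items : List String) : List String :=
  (items.foldl
    (fun (acc : PySem.Set String × List String) x =>
      if PySem.Set.contains acc.1 x then acc
      else (PySem.Set.add acc.1 x, acc.2 ++ [x]))
    (PySem.Set.empty, [])).2

def resolve_sender_candidates_py (sender_query : Option String) (contact_names : List (String × String)) (known_usernames : List String) : List String :=
  let q := PySem.Str.strip (sender_query.getD "")
  if q = "" then []
  else
    let ql := PySem.Str.lower q
    let known := known_usernames.filter (fun u => u ≠ "")
    let exact_user := known.filter (fun u => PySem.Str.lower u == ql)
    if exact_user ≠ [] then pvDedupKeepOrder exact_user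
    else
      let exact_display := known.foldl
        (fun acc u => if pvDispLower contact_names u == ql then acc ++ [u] else acc) []
      if exact_display ≠ [] then pvDedupKeepOrder exact_display
      else
        let part := known.foldl
          (fun acc u =>
            if PySem.Str.isIn ql (PySem.Str.lower u) || PySem.Str.isIn ql (pvDispLower contact_names u)
            then acc ++ [u] else acc) []
        pvDedupKeepOrder part

-- ===== PORT B =====
-- one step of B's categorizing loop: append u to each bucket it qualifies for
def pvBucketsStep (contact_names : List (String × String)) (ql : String)
    (acc : List String × List String × List String) (u : String) :
    List String × List String × List String :=
  if u = "" then acc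
  else
    let ul := PySem.Str.lower u
    let d := pvDispLower contact_names u
    ((if ul == ql then acc.1 ++ [u] else acc.1),
     (if d == ql then acc.2.1 ++ [u] else acc.2.1),
     (if PySem.Str.isIn ql ul || PySem.Str.isIn ql d then acc.2.2 ++ [u] else acc.2.2))

def resolve_sender_candidates_py_alt (sender_query : Option String) (contact_names : List (String × String)) (known_usernames : List String) : List String :=
  let q := PySem.Str.strip (sender_query.getD "")
  if q = "" then []
  else
    let ql := PySem.Str.lower q
    let buckets := known_usernames.foldl (pvBucketsStep contact_names ql) ([], [], [])
    let bucket := if buckets.1 ≠ [] then buckets.1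
                  else if buckets.2.1 ≠ [] then buckets.2.1 else buckets.2.2
    PySem.List.dedup bucket

-- ===== PRECONDITION & SPEC =====
def Spec_resolve_sender_candidates_py (sender_query : Option String) (contact_names : List (String × String)) (known_usernames : List String) (out : List String) : Prop := out = resolve_sender_candidates_py_alt sender_query contact_names known_usernames
instance (sender_query : Option String) (contact_names : List (String × String)) (known_usernames : List String) (out : List String) : Decidable (Spec_resolve_sender_candidates_py sender_query contact_names known_usernames out) := by unfold Spec_resolve_sender_candidates_py; infer_instance

-- ===== CLAIM (what is proved, stated in full; the proofs are below) =====
def Claim_equal_resolve_sender_candidates_py : Prop := ∀ (sender_query : Option String) (contact_names : List (String × String)) (known_usernames : List String), Dom_resolve_sender_candidates_py sender_query contact_names known_usernames → Spec_resolve_sender_candidates_py sender_query contact_names known_usernames (resolve_sender_candidates_py sender_query contact_names known_usernames)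

-- ===== LEMMAS AND PROOFS =====

-- A's seen-set dedup loop equals Python's dict.fromkeys ordered dedup.
theorem pvDedup_loop_eq (items : List String) :
    ∀ (seen out : List String), (∀ x, PySem.Set.contains seen x = PySem.Set.contains out x) →
    (items.foldl
      (fun (acc : PySem.Set String × List String) x =>
        if PySem.Set.contains acc.1 x then acc
        else (PySem.Set.add acc.1 x, acc.2 ++ [x]))
      (seen, out)).2 = items.foldl PySem.Set.add out := by
  induction items with
  | nil => intro seen out _; rfl
  | cons x xs ih =>
    intro seen out h
    simp only [List.foldl_cons]
    by_cases hc : PySem.Set.contains seen x = true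
    · have hco : PySem.Set.contains out x = true := by rw [← h]; exact hc
      rw [if_pos hc]
      have hadd : PySem.Set.add out x = out := by unfold PySem.Set.add; rw [if_pos hco]
      rw [hadd]
      exact ih seen out h
    · have hco : PySem.Set.contains out x = false := by
        rw [← h x]; exact eq_false_of_ne_true hc
      rw [if_neg hc]
      have hadd : PySem.Set.add out x = out ++ [x] := by unfold PySem.Set.add; rw [if_neg (by rw [hco]; decide)]
      rw [hadd]
      refine ih _ _ (fun y => ?_)
      have hy := h y
      have hsadd : PySem.Set.add seen x = seen ++ [x] := by unfold PySem.Set.add; rw [if_neg hc]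
      rw [hsadd]
      simp only [PySem.Set.contains_eq_listContains, List.contains_append] at hy ⊢
      rw [hy]

theorem pvDedupKeepOrder_eq (items : List String) :
    pvDedupKeepOrder items = PySem.List.dedup items := by
  unfold pvDedupKeepOrder
  rw [pvDedup_loop_eq items PySem.Set.empty [] (fun _ => rfl)]
  rw [PySem.List.dedup_eq_ofList, PySem.Set.ofList_eq_foldl]

-- B's single pass produces exactly A's three lists.
set_option maxHeartbeats 1600000 in
theorem pvBuckets_spec (contact_names : List (String × String)) (ql : String) :
    ∀ (ku : List String) (e d p : List String),
    ku.foldl (pvBucketsStep contact_names ql) (e, d, p) =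
      (e ++ (ku.filter (fun u => u ≠ "")).filter (fun u => PySem.Str.lower u == ql),
       d ++ (ku.filter (fun u => u ≠ "")).filter (fun u => pvDispLower contact_names u == ql),
       p ++ (ku.filter (fun u => u ≠ "")).filter
              (fun u => PySem.Str.isIn ql (PySem.Str.lower u) || PySem.Str.isIn ql (pvDispLower contact_names u))) := by
  intro ku
  induction ku with
  | nil => intro e d p; simp
  | cons x xs ih =>
    intro e d p
    have key : ∀ (q : String → Bool) (e0 ys : List String),
        (if q x = true then e0 ++ [x] else e0) ++ ys.filter q = e0 ++ (x :: ys).filter q := by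
      intro q e0 ys
      rw [List.filter_cons]
      by_cases h : q x = true <;> simp [h]
    by_cases hx : x = ""
    · subst hx
      simp only [List.foldl_cons, pvBucketsStep]
      simpa using ih e d p
    · simp only [List.foldl_cons, pvBucketsStep, if_neg hx]
      rw [ih]
      have hfc : (x :: xs).filter (fun u => decide (u ≠ "")) =
          x :: xs.filter (fun u => decide (u ≠ "")) := by
        simp [hx]
      rw [hfc, ← key, ← key, ← key]

set_option maxHeartbeats 1000000 in
theorem resolve_sender_candidates_py_spec : Claim_equal_resolve_sender_candidates_py := by
  unfold Claim_equal_resolve_sender_candidates_py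
  intro sq cn ku _
  unfold Spec_resolve_sender_candidates_py
  unfold resolve_sender_candidates_py resolve_sender_candidates_py_alt
  by_cases hq : PySem.Str.strip (sq.getD "") = ""
  · simp only [if_pos hq]
  · simp only [if_neg hq, pvBuckets_spec, List.nil_append,
      PySem.List.foldl_append_if_eq_filter, pvDedupKeepOrder_eq]
    split_ifs <;> rfl
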